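-- pv_equiv track=rewrite | github.com/gosunt/OmniFi | client_mode/rogue_ap.py | _expected_vendor_for_ssid
-- ===== SOURCE A (Python) =====
-- def _expected_vendor_for_ssid(ssid: str) -> str:
--     s = ssid.lower()
--     if any(k in s for k in ("jio", "jiowifi", "jiofiber")):
--         return "jio"
--     if any(k in s for k in ("airtel", "xstream")):
--         return "airtel"
--     if any(k in s for k in ("bsnl", "bharat")):
--         return "bsnl"
--     if "tplink" in s or "tp-link" in s:
--         return "tplink"
--     if "netgear" in s:
--         return "netgear"
--     if "dlink" in s or "d-link" in s:
--         return "dlink"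
--     if "asus" in s:
--         return "asus"
--     return "unknown"
-- ===== SOURCE B (Python) =====
-- # B: positional single scan — walk the lowercased SSID once, at each offset record
-- # which vendors have a keyword starting there (set accumulator), then resolve the
-- # vendor-priority order over the collected set; A instead runs one independent
-- # substring search per vendor branch with early exit.
-- _KEYWORDS = (
--     ("jio", "jio"), ("jiowifi", "jio"), ("jiofiber", "jio"),
--     ("airtel", "airtel"), ("xstream", "airtel"),
--     ("bsnl", "bsnl"), ("bharat", "bsnl"),
--     ("tplink", "tplink"), ("tp-link", "tplink"),
--     ("netgear", "netgear"),
--     ("dlink", "dlink"), ("d-link", "dlink"),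
--     ("asus", "asus"),
-- )
-- _PRIORITY = ("jio", "airtel", "bsnl", "tplink", "netgear", "dlink", "asus")
--
-- def _expected_vendor_for_ssid(ssid: str) -> str:
--     s = ssid.lower()
--     found = set()
--     for i in range(len(s) + 1):
--         for kw, vendor in _KEYWORDS:
--             if s.startswith(kw, i):
--                 found.add(vendor)
--     for vendor in _PRIORITY:
--         if vendor in found:
--             return vendor
--     return "unknown"
-- ===== Notes on version B (the rewrite author's own statement) =====
-- stated objective: alternative
-- what changed: Single positional left-to-right scan: at each offset of the lowercased SSID it records which vendors have a keyword starting there into a set accumulator, then a final pass over the vendor-priority order picks the winner; A instead runs a separate early-exit substring search per vendor branch.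
import Mathlib
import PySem

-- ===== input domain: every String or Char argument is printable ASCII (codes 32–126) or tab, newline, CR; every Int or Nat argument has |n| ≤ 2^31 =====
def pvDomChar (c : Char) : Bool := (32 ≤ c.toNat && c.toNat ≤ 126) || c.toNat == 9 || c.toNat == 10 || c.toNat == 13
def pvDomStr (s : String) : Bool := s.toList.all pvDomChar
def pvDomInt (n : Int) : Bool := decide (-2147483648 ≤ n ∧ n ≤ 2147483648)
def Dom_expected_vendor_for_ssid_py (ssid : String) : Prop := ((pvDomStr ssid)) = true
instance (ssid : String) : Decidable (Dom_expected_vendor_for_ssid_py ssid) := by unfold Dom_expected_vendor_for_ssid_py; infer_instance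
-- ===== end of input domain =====

-- B replaces A's chain of per-vendor early-exit substring searches by one positional scan
-- that collects the set of matched vendors, resolved by a final priority pass (alternative decomposition).

-- ===== PORT A =====
def expected_vendor_for_ssid_py (ssid : String) : String :=
  let s := PySem.Str.lower ssid
  if PySem.Str.isIn "jio" s || PySem.Str.isIn "jiowifi" s || PySem.Str.isIn "jiofiber" s then "jio"
  else if PySem.Str.isIn "airtel" s || PySem.Str.isIn "xstream" s then "airtel"
  else if PySem.Str.isIn "bsnl" s || PySem.Str.isIn "bharat" s then "bsnl"
  else if PySem.Str.isIn "tplink" s || PySem.Str.isIn "tp-link" s then "tplink"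
  else if PySem.Str.isIn "netgear" s then "netgear"
  else if PySem.Str.isIn "dlink" s || PySem.Str.isIn "d-link" s then "dlink"
  else if PySem.Str.isIn "asus" s then "asus"
  else "unknown"

-- ===== PORT B =====
def pvKeywords : List (String × String) :=
  [("jio", "jio"), ("jiowifi", "jio"), ("jiofiber", "jio"),
   ("airtel", "airtel"), ("xstream", "airtel"),
   ("bsnl", "bsnl"), ("bharat", "bsnl"),
   ("tplink", "tplink"), ("tp-link", "tplink"),
   ("netgear", "netgear"),
   ("dlink", "dlink"), ("d-link", "dlink"),
   ("asus", "asus")]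

def pvPriority : List String := ["jio", "airtel", "bsnl", "tplink", "netgear", "dlink", "asus"]

-- the positional scan: for i in range(len(s)+1): for kw, vendor in _KEYWORDS: if s.startswith(kw, i): found.add(vendor)
def pvFound (cs : List Char) : PySem.Set String :=
  (List.range (cs.length + 1)).foldl
    (fun acc i =>
      pvKeywords.foldl
        (fun acc2 r =>
          if PySem.Chars.startswith (cs.drop i) r.1.toList then PySem.Set.add acc2 r.2 else acc2)
        acc)
    PySem.Set.empty

def expected_vendor_for_ssid_py_alt (ssid : String) : String :=
  let found := pvFound (PySem.Chars.lower ssid.toList)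
  match pvPriority.find? (fun v => found.contains v) with
  | some v => v
  | none => "unknown"

-- ===== PRECONDITION & SPEC =====
def Spec_expected_vendor_for_ssid_py (ssid : String) (out : String) : Prop := out = expected_vendor_for_ssid_py_alt ssid
instance (ssid : String) (out : String) : Decidable (Spec_expected_vendor_for_ssid_py ssid out) := by unfold Spec_expected_vendor_for_ssid_py; infer_instance

-- ===== CLAIM (what is proved, stated in full; the proofs are below) =====
def Claim_equal_expected_vendor_for_ssid_py : Prop := ∀ (ssid : String), Dom_expected_vendor_for_ssid_py ssid → Spec_expected_vendor_for_ssid_py ssid (expected_vendor_for_ssid_py ssid)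

-- ===== LEMMAS AND PROOFS =====

-- membership after the inner keyword loop of B's scan
theorem pv_mem_inner (l : List (String × String)) (acc : PySem.Set String) (p : String × String → Bool) (v : String) :
    v ∈ l.foldl (fun acc2 r => if p r then PySem.Set.add acc2 r.2 else acc2) acc ↔
      v ∈ acc ∨ ∃ r ∈ l, p r = true ∧ r.2 = v := by
  induction l generalizing acc with
  | nil => simp
  | cons r l ih =>
    simp only [List.foldl_cons, List.exists_mem_cons_iff]
    by_cases h : p r = true
    · simp only [h, if_true, ih, PySem.Set.mem_add]
      tauto
    · rw [if_neg (by simp [h])]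
      rw [ih]
      tauto

-- membership after the outer positional loop of B's scan
theorem pv_mem_outer (idx : List Nat) (cs : List Char) (acc : PySem.Set String) (v : String) :
    v ∈ idx.foldl (fun acc i =>
        pvKeywords.foldl (fun acc2 r =>
          if PySem.Chars.startswith (cs.drop i) r.1.toList then PySem.Set.add acc2 r.2 else acc2) acc)
        acc ↔
      v ∈ acc ∨ ∃ i ∈ idx, ∃ r ∈ pvKeywords,
        PySem.Chars.startswith (cs.drop i) r.1.toList = true ∧ r.2 = v := by
  induction idx generalizing acc with
  | nil => simp
  | cons i idx ih =>
    rw [List.foldl_cons, ih, pv_mem_inner _ _ (fun r => PySem.Chars.startswith (cs.drop i) r.1.toList)]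
    simp only [List.exists_mem_cons_iff]
    exact or_assoc

-- a keyword starts at some scanned offset iff it is a substring
theorem pv_ex_range (cs kw : List Char) :
    (∃ i ∈ List.range (cs.length + 1), PySem.Chars.startswith (cs.drop i) kw = true) ↔
      PySem.Chars.isIn kw cs = true := by
  rw [← PySem.Chars.exists_prefix_drop_iff_isIn]
  constructor
  · rintro ⟨i, _, h⟩; exact ⟨i, (PySem.Chars.startswith_iff _ _).mp h⟩
  · rintro ⟨j, h⟩
    refine ⟨min j cs.length, ?_, (PySem.Chars.startswith_iff _ _).mpr ?_⟩
    · simp [List.mem_range]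
    · by_cases hj : j ≤ cs.length
      · simpa [min_eq_left hj] using h
      · have hd : cs.drop j = [] := List.drop_eq_nil_of_le (by omega)
        rw [hd] at h
        have hk : kw = [] := List.prefix_nil.mp h
        simp [hk]

-- the vendor set B collects, characterised by substring tests
theorem pv_contains_found (cs : List Char) (v : String) :
    (pvFound cs).contains v =
      pvKeywords.any (fun r => PySem.Chars.isIn r.1.toList cs && r.2 == v) := by
  rw [Bool.eq_iff_iff, PySem.Set.contains_iff, List.any_eq_true]
  unfold pvFound
  rw [pv_mem_outer]
  constructor
  · rintro (hv | ⟨i, hi, r, hr, hs, hv⟩)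
    · simp [PySem.Set.empty] at hv
    · exact ⟨r, hr, by
        have : PySem.Chars.isIn r.1.toList cs = true := (pv_ex_range cs r.1.toList).mp ⟨i, hi, hs⟩
        simp [this, hv]⟩
  · rintro ⟨r, hr, h⟩
    simp only [Bool.and_eq_true, beq_iff_eq] at h
    obtain ⟨i, hi, hs⟩ := (pv_ex_range cs r.1.toList).mpr h.1
    exact Or.inr ⟨i, hi, r, hr, hs, h.2⟩

-- ===== VERDICT (by name: the statement is the Claim_ definition above) =====
theorem expected_vendor_for_ssid_py_spec : Claim_equal_expected_vendor_for_ssid_py := by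
  intro ssid _
  unfold Spec_expected_vendor_for_ssid_py expected_vendor_for_ssid_py expected_vendor_for_ssid_py_alt
  simp only [pvPriority, List.find?, pv_contains_found, pvKeywords, List.any_cons, List.any_nil,
    PySem.Str.isIn_eq, PySem.Str.toList_lower, String.reduceBEq, beq_self_eq_true,
    Bool.and_true, Bool.and_false, Bool.or_false, Bool.false_or]
  generalize PySem.Chars.isIn "jio".toList (PySem.Chars.lower ssid.toList) = b1
  generalize PySem.Chars.isIn "jiowifi".toList (PySem.Chars.lower ssid.toList) = b2
  generalize PySem.Chars.isIn "jiofiber".toList (PySem.Chars.lower ssid.toList) = b3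
  generalize PySem.Chars.isIn "airtel".toList (PySem.Chars.lower ssid.toList) = b4
  generalize PySem.Chars.isIn "xstream".toList (PySem.Chars.lower ssid.toList) = b5
  generalize PySem.Chars.isIn "bsnl".toList (PySem.Chars.lower ssid.toList) = b6
  generalize PySem.Chars.isIn "bharat".toList (PySem.Chars.lower ssid.toList) = b7
  generalize PySem.Chars.isIn "tplink".toList (PySem.Chars.lower ssid.toList) = b8
  generalize PySem.Chars.isIn "tp-link".toList (PySem.Chars.lower ssid.toList) = b9
  generalize PySem.Chars.isIn "netgear".toList (PySem.Chars.lower ssid.toList) = b10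
  generalize PySem.Chars.isIn "dlink".toList (PySem.Chars.lower ssid.toList) = b11
  generalize PySem.Chars.isIn "d-link".toList (PySem.Chars.lower ssid.toList) = b12
  generalize PySem.Chars.isIn "asus".toList (PySem.Chars.lower ssid.toList) = b13
  revert b1 b2 b3 b4 b5 b6 b7 b8 b9 b10 b11 b12 b13
  decide
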